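-- pv_equiv track=rewrite | github.com/DA-testa/parallel-processing-VanagsAlekssRTU | main.py | parallel_processing
-- ===== SOURCE A (Python) =====
-- from queue import PriorityQueue
--
-- def parallel_processing(n, m, data):
--     output = []
--     threads = PriorityQueue()
--
--     for i in range(n):
--         threads.put((0, i))
--
--     for i in range(m):
--         time, thread = threads.get()
--         output.append((thread, time))
--         threads.put((time + data[i], thread))
--
--     return output
-- ===== SOURCE B (Python) =====
-- def parallel_processing(n, m, data):
--     finish = [0] * n
--     output = []
--     for i in range(m):
--         d = data[i]
--         t = min(range(n), key=lambda j: (finish[j], j))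
--         output.append((t, finish[t]))
--         finish[t] += d
--     return output
-- ===== Notes on version B (the rewrite author's own statement) =====
-- stated objective: simpler
-- what changed: Replaces the priority queue of (time, thread) pairs with a plain array of per-thread finish times and a linear min-scan (earliest finish, ties by lowest index) per task.
import Mathlib
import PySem

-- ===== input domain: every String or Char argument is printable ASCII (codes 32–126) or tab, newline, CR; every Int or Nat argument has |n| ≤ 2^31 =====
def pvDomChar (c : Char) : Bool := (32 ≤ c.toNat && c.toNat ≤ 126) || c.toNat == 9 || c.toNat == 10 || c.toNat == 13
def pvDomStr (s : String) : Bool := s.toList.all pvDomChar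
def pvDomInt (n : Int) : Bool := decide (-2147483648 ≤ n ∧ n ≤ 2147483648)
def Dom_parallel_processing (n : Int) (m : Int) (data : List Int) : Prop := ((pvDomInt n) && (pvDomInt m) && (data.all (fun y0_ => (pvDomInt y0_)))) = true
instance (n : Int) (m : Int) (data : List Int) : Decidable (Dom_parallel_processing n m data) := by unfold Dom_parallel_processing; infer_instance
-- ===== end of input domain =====

-- B replaces A's priority queue with a per-thread finish-time array and a linear
-- min-scan per task (simpler data structure, same return value).

-- ===== PORT A =====
-- A's PriorityQueue holds (time, thread) pairs; get() returns the lexicographically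
-- least pair.  We model the queue as a list: put = append at the end, get = least
-- pair (the heap's internal layout is not observable, only get()'s order is).
def pqCombine (x : Int × Int) : Option (Int × Int) → Option (Int × Int)
  | none => some x
  | some y => if x.1 < y.1 ∨ (x.1 = y.1 ∧ x.2 ≤ y.2) then some x else some y

def pqMin : List (Int × Int) → Option (Int × Int)
  | [] => none
  | x :: xs => pqCombine x (pqMin xs)

-- 'for i in range(m)': k iterations left, i the current index
def aLoop (data : List Int) : Nat → Nat → List (Int × Int) → List (Int × Int)
  | 0, _, _ => []
  | k + 1, i, q =>
    match pqMin q with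
    | none => []        -- empty queue: Python's get() blocks forever (outside Pre_)
    | some tt =>
      match PySem.List.pyGet? data (i : Int) with
      | none => []      -- data[i] raises IndexError (outside Pre_)
      | some d => (tt.2, tt.1) :: aLoop data k (i + 1) ((q.erase tt) ++ [(tt.1 + d, tt.2)])

def parallel_processing (n : Int) (m : Int) (data : List Int) : List (Int × Int) :=
  aLoop data m.toNat 0 ((List.range n.toNat).map (fun (i : Nat) => ((0 : Int), (i : Int))))

-- ===== PORT B =====
-- min(range(n), key=lambda j: (finish[j], j)): index of the first minimal finish time
def argmin : List Int → Nat
  | [] => 0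
  | x :: xs =>
    if xs = [] then 0
    else (let j := argmin xs; if x ≤ xs.getD j 0 then 0 else j + 1)

def bLoop (data : List Int) : Nat → Nat → List Int → List (Int × Int)
  | 0, _, _ => []
  | k + 1, i, fin =>
    match PySem.List.pyGet? data (i : Int) with
    | none => []        -- data[i] raises IndexError (outside Pre_)
    | some d =>
      if fin = [] then []   -- min(range(0)) raises ValueError (outside Pre_)
      else
        let t := argmin fin
        ((t : Int), fin.getD t 0) :: bLoop data k (i + 1) (fin.set t (fin.getD t 0 + d))

def parallel_processing_alt (n : Int) (m : Int) (data : List Int) : List (Int × Int) :=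
  bLoop data m.toNat 0 (List.replicate n.toNat 0)

-- ===== PRECONDITION & SPEC =====
-- Pre_ excludes exactly the inputs where A does not return: m > len(data) raises
-- IndexError, and n ≤ 0 with m > 0 makes the empty PriorityQueue's get() block forever.
def Pre_parallel_processing (n : Int) (m : Int) (data : List Int) : Prop :=
  m ≤ (data.length : Int) ∧ (0 < n ∨ m ≤ 0)
instance (n : Int) (m : Int) (data : List Int) : Decidable (Pre_parallel_processing n m data) := by
  unfold Pre_parallel_processing; infer_instance

def pvWitness_parallel_processing : Int × Int × List Int := (2, 3, [1, 2, 3])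

def Spec_parallel_processing (n : Int) (m : Int) (data : List Int) (out : List (Int × Int)) : Prop := out = parallel_processing_alt n m data
instance (n : Int) (m : Int) (data : List Int) (out : List (Int × Int)) : Decidable (Spec_parallel_processing n m data out) := by unfold Spec_parallel_processing; infer_instance

-- ===== CLAIM (what is proved, stated in full; the proofs are below) =====
def Claim_equal_parallel_processing : Prop := ∀ (n : Int) (m : Int) (data : List Int), Dom_parallel_processing n m data → Pre_parallel_processing n m data → Spec_parallel_processing n m data (parallel_processing n m data)

-- ===== LEMMAS AND PROOFS =====

-- the queue that corresponds to a finish-time array, threads numbered from `off`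
def qOf (off : Int) : List Int → List (Int × Int)
  | [] => []
  | x :: xs => (x, off) :: qOf (off + 1) xs

theorem pqCombine_comm (x y : Int × Int) (r : Option (Int × Int)) :
    pqCombine x (pqCombine y r) = pqCombine y (pqCombine x r) := by
  obtain ⟨x1, x2⟩ := x; obtain ⟨y1, y2⟩ := y
  cases r with
  | none =>
      simp only [pqCombine]
      split_ifs <;> simp only [Option.some.injEq, Prod.mk.injEq] at * <;> omega
  | some z =>
      obtain ⟨z1, z2⟩ := z
      simp only [pqCombine]
      split_ifs <;>
        simp only [pqCombine] <;>
        split_ifs <;>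
        simp only [Option.some.injEq, Prod.mk.injEq] at * <;> omega

theorem pqMin_perm {l l' : List (Int × Int)} (h : l.Perm l') : pqMin l = pqMin l' := by
  induction h with
  | nil => rfl
  | cons x _ ih => simp [pqMin, ih]
  | swap x y l => simp [pqMin, pqCombine_comm]
  | trans _ _ ih₁ ih₂ => exact ih₁.trans ih₂

theorem pqMin_qOf (fin : List Int) (off : Int) (h : fin ≠ []) :
    pqMin (qOf off fin) = some (fin.getD (argmin fin) 0, off + (argmin fin : Int)) := by
  induction fin generalizing off with
  | nil => exact absurd rfl h
  | cons x xs ih =>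
    by_cases hxs : xs = []
    · subst hxs
      simp [qOf, pqMin, pqCombine, argmin]
    · have step : pqMin (qOf off (x :: xs)) = pqCombine (x, off) (pqMin (qOf (off + 1) xs)) := rfl
      rw [step, ih (off + 1) hxs]
      simp only [pqCombine]
      by_cases hle : x ≤ xs.getD (argmin xs) 0
      · have ha : argmin (x :: xs) = 0 := by
          rw [argmin, if_neg hxs]
          show (if x ≤ xs.getD (argmin xs) 0 then 0 else argmin xs + 1) = 0
          rw [if_pos hle]
        rw [if_pos (by
          rcases lt_or_eq_of_le hle with h' | h'
          · exact Or.inl h'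
          · exact Or.inr ⟨h', by omega⟩)]
        rw [ha]
        simp
      · have ha : argmin (x :: xs) = argmin xs + 1 := by
          rw [argmin, if_neg hxs]
          show (if x ≤ xs.getD (argmin xs) 0 then 0 else argmin xs + 1) = argmin xs + 1
          rw [if_neg hle]
        rw [if_neg (by rintro (h' | ⟨h', -⟩) <;> omega)]
        rw [ha]
        have hg : ((x :: xs).getD (argmin xs + 1) 0) = xs.getD (argmin xs) 0 := rfl
        rw [hg]
        congr 1
        refine Prod.ext rfl ?_
        show off + 1 + (argmin xs : Int) = off + ((argmin xs + 1 : Nat) : Int)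
        push_cast; ring

theorem argmin_lt_length (fin : List Int) (h : fin ≠ []) : argmin fin < fin.length := by
  induction fin with
  | nil => exact absurd rfl h
  | cons x xs ih =>
    by_cases hxs : xs = []
    · subst hxs; simp [argmin]
    · rw [argmin, if_neg hxs]
      show (if x ≤ xs.getD (argmin xs) 0 then 0 else argmin xs + 1) < (x :: xs).length
      split_ifs
      · simp
      · simpa using Nat.succ_lt_succ (ih hxs)

theorem qOf_set_perm (fin : List Int) (t : Nat) (off : Int) (v : Int) (ht : t < fin.length) :
    (qOf off (fin.set t v)).Perm (((qOf off fin).erase (fin.getD t 0, off + (t : Int))) ++ [(v, off + (t : Int))]) := by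
  induction fin generalizing t off with
  | nil => simp at ht
  | cons x xs ih =>
    cases t with
    | zero =>
      simp only [List.set, qOf, Nat.cast_zero, add_zero, List.getD_cons_zero]
      rw [List.erase_cons_head]
      exact (List.perm_append_singleton _ _).symm
    | succ t =>
      have hne : ¬ (((x, off) : Int × Int) == (xs.getD t 0, off + ((t + 1 : Nat) : Int))) = true := by
        simp only [beq_iff_eq, Prod.mk.injEq, not_and]
        intro _ h2
        omega
      have hgetD : (x :: xs).getD (t + 1) 0 = xs.getD t 0 := rfl
      have harith : off + ((t + 1 : Nat) : Int) = (off + 1) + (t : Int) := by push_cast; ring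
      simp only [List.set, qOf, hgetD]
      rw [List.erase_cons_tail hne, harith, List.cons_append]
      exact List.Perm.cons _ (ih t (off + 1) (by simpa using ht))

theorem qOf_replicate (k : Nat) (off : Int) :
    qOf off (List.replicate k 0) = (List.range k).map (fun (i : Nat) => ((0 : Int), off + (i : Int))) := by
  induction k generalizing off with
  | zero => rfl
  | succ k ih =>
    rw [List.replicate_succ, List.range_succ_eq_map, List.map_cons]
    show (0, off) :: qOf (off + 1) (List.replicate k 0) = _
    rw [ih]
    simp only [Nat.cast_zero, add_zero, List.map_map]
    congr 1
    apply List.map_congr_left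
    intro a _
    simp only [Function.comp_apply]
    refine Prod.ext rfl ?_
    show (off + 1) + (a : Int) = off + ((a + 1 : Nat) : Int)
    push_cast; ring

theorem loop_eq (data : List Int) (k i : Nat) (fin : List Int) (q : List (Int × Int))
    (hq : q.Perm (qOf 0 fin)) : aLoop data k i q = bLoop data k i fin := by
  induction k generalizing i fin q with
  | zero => rfl
  | succ k ih =>
    by_cases hfin : fin = []
    · subst hfin
      have hq0 : q = [] := List.Perm.eq_nil (by simpa [qOf] using hq)
      subst hq0
      have ha : aLoop data (k + 1) i [] = [] := rfl
      have hb : bLoop data (k + 1) i [] = [] := by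
        rw [bLoop]
        cases PySem.List.pyGet? data (i : Int) <;> simp
      rw [ha, hb]
    · have hmin : pqMin q = some (fin.getD (argmin fin) 0, (argmin fin : Int)) := by
        rw [pqMin_perm hq, pqMin_qOf fin 0 hfin]; simp
      rw [aLoop, bLoop, hmin]
      cases hd : PySem.List.pyGet? data (i : Int) with
      | none => rfl
      | some d =>
        simp only [if_neg hfin]
        congr 1
        apply ih
        have h1 : (q.erase (fin.getD (argmin fin) 0, (argmin fin : Int))).Perm
            ((qOf 0 fin).erase (fin.getD (argmin fin) 0, (argmin fin : Int))) :=
          hq.erase _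
        have h2 := qOf_set_perm fin (argmin fin) 0 (fin.getD (argmin fin) 0 + d)
          (argmin_lt_length fin hfin)
        simp only [zero_add] at h2
        exact ((h1.append_right _).trans h2.symm)

-- ===== VERDICT (by name: the statement is the Claim_ definition above) =====
theorem parallel_processing_spec : Claim_equal_parallel_processing := by
  intro n m data _ _
  unfold Spec_parallel_processing parallel_processing parallel_processing_alt
  apply loop_eq
  rw [qOf_replicate]
  simp
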